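-- pv_equiv track=rewrite | github.com/pit00/codium | python/atmHesit.py | maximumThrill
-- ===== SOURCE A (Python) =====
-- def maximumThrill(atms: list[int]) -> int:
--     maxThrill = max(atms) * 2
--
--     size = range(len(atms))
--     for i in size:
--         for j in size:
--             calc = atms[i] + atms[j] + abs(i - j)
--             if calc > maxThrill:
--                 maxThrill = calc
--
--     return maxThrill
-- ===== SOURCE B (Python) =====
-- def maximumThrill(atms: list[int]) -> int:
--     # One pass: for each j, the best pair (i <= j) is atms[j] + j + max_{k <= j}(atms[k] - k).
--     best = atms[0]          # max over k <= j of atms[k] - k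
--     ans = 2 * atms[0]       # pair (0, 0)
--     for j in range(1, len(atms)):
--         v = atms[j]
--         if v - j > best:
--             best = v - j
--         cur = v + j + best
--         if cur > ans:
--             ans = cur
--     return ans
-- ===== Notes on version B (the rewrite author's own statement) =====
-- stated objective: faster
-- what changed: Replaces the O(n^2) double loop over all index pairs by a single pass that keeps the running maximum of atms[k]-k, using max(atms[i]+atms[j]+|i-j|) = max over i<=j of (atms[i]-i)+(atms[j]+j).
-- outside the precondition, e.g. on maximumThrill([]): A raises ValueError, B raises IndexError
import Mathlib
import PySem

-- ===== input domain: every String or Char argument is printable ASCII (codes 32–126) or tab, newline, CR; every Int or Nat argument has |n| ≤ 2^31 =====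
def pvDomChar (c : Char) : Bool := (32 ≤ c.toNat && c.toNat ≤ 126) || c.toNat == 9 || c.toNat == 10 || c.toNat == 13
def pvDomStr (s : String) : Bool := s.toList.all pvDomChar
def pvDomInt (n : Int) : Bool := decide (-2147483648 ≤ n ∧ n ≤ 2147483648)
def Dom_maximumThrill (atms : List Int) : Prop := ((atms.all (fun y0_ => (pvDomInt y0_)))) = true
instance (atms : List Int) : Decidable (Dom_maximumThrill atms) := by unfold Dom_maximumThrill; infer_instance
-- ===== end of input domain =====

-- B replaces A's O(n^2) double loop by a single pass tracking max(atms[k]-k); objective: faster.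

-- ===== PORT A =====
-- indices i, j always lie in range(len(atms)), so pyGetD's default is never used
def maximumThrill (atms : List Int) : Int :=
  let maxThrill : Int := (PySem.List.max? atms (fun x => x)).getD 0 * 2
  let n : Int := (atms.length : Int)
  (PySem.List.pyRange 0 n 1).foldl (fun m i =>
    (PySem.List.pyRange 0 n 1).foldl (fun m j =>
      let c := PySem.List.pyGetD atms i 0 + PySem.List.pyGetD atms j 0 + |i - j|
      if c > m then c else m) m) maxThrill

-- ===== PORT B =====
def maximumThrill_alt (atms : List Int) : Int :=
  let a0 : Int := PySem.List.pyGetD atms 0 0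
  let s := (PySem.List.pyRange 1 (atms.length : Int) 1).foldl
    (fun (s : Int × Int) j =>
      let v := PySem.List.pyGetD atms j 0
      let best := if v - j > s.1 then v - j else s.1
      let cur := v + j + best
      (best, if cur > s.2 then cur else s.2))
    (a0, 2 * a0)
  s.2

-- ===== PRECONDITION & SPEC =====
-- Pre_ excludes only the empty list, on which A raises ValueError (max of empty sequence).
def Pre_maximumThrill (atms : List Int) : Prop := atms ≠ []
instance (atms : List Int) : Decidable (Pre_maximumThrill atms) := by unfold Pre_maximumThrill; infer_instance
def pvWitness_maximumThrill : List Int := [3, -1, 4]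

def Spec_maximumThrill (atms : List Int) (out : Int) : Prop := out = maximumThrill_alt atms
instance (atms : List Int) (out : Int) : Decidable (Spec_maximumThrill atms out) := by unfold Spec_maximumThrill; infer_instance

-- ===== CLAIM (what is proved, stated in full; the proofs are below) =====
def Claim_equal_maximumThrill : Prop := ∀ (atms : List Int), Dom_maximumThrill atms → Pre_maximumThrill atms → Spec_maximumThrill atms (maximumThrill atms)

-- ===== LEMMAS AND PROOFS =====

-- proof-only abbreviations
def pvG (atms : List Int) (i : Int) : Int := PySem.List.pyGetD atms i 0
def pvCalc (atms : List Int) (i j : Int) : Int := pvG atms i + pvG atms j + |i - j|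

-- generic facts about max-accumulating folds
theorem pv_init_le_foldl (step : Int → Int → Int) (H : ∀ m x, m ≤ step m x) :
    ∀ (l : List Int) (m0 : Int), m0 ≤ l.foldl step m0 := by
  intro l
  induction l with
  | nil => intro m0; exact le_refl _
  | cons y t ih => intro m0; exact le_trans (H m0 y) (ih _)

theorem pv_le_foldl_of_mem (step : Int → Int → Int) (H : ∀ m x, m ≤ step m x)
    (c x : Int) (Hx : ∀ m, c ≤ step m x) :
    ∀ (l : List Int) (m0 : Int), x ∈ l → c ≤ l.foldl step m0 := by
  intro l
  induction l with
  | nil => intro m0 h; simp at h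
  | cons y t ih =>
    intro m0 h
    rcases List.mem_cons.mp h with h | h
    · subst h
      exact le_trans (Hx m0) (pv_init_le_foldl step H t _)
    · exact ih _ h

theorem pv_foldl_shape (step : Int → Int → Int) (Q : Int → Prop) :
    ∀ (l : List Int) (m0 : Int), (∀ m y, y ∈ l → step m y = m ∨ Q (step m y)) →
      l.foldl step m0 = m0 ∨ Q (l.foldl step m0) := by
  intro l
  induction l with
  | nil => intro m0 _; left; rfl
  | cons y t ih =>
    intro m0 H
    have ht := ih (step m0 y) (fun m z hz => H m z (List.mem_cons_of_mem _ hz))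
    rcases ht with ht | ht
    · rw [List.foldl_cons] at *
      rw [ht]
      exact H m0 y (List.mem_cons_self)
    · right; exact ht

-- A's inner step, for fixed i
theorem pv_stepJ_le (atms : List Int) (i : Int) :
    ∀ m j, m ≤ (fun m j => let c := PySem.List.pyGetD atms i 0 + PySem.List.pyGetD atms j 0 + |i - j|
      if c > m then c else m) m j := by
  intro m j; dsimp only; split <;> omega

theorem pv_stepJ_self (atms : List Int) (i j : Int) :
    ∀ m, pvCalc atms i j ≤ (fun m j => let c := PySem.List.pyGetD atms i 0 + PySem.List.pyGetD atms j 0 + |i - j|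
      if c > m then c else m) m j := by
  intro m; dsimp only; split <;> simp [pvCalc, pvG] <;> omega

-- upper bound : every pair value is ≤ A's result
theorem pvA_ub (atms : List Int) (i j : Int)
    (hi : i ∈ PySem.List.pyRange 0 (atms.length : Int) 1)
    (hj : j ∈ PySem.List.pyRange 0 (atms.length : Int) 1) (m0 : Int) :
    pvCalc atms i j ≤
      (PySem.List.pyRange 0 (atms.length : Int) 1).foldl (fun m i =>
        (PySem.List.pyRange 0 (atms.length : Int) 1).foldl (fun m j =>
          let c := PySem.List.pyGetD atms i 0 + PySem.List.pyGetD atms j 0 + |i - j|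
          if c > m then c else m) m) m0 := by
  apply pv_le_foldl_of_mem _ _ _ i _ _ m0 hi
  · intro m x
    exact pv_init_le_foldl _ (pv_stepJ_le atms x) _ m
  · intro m
    exact pv_le_foldl_of_mem _ (pv_stepJ_le atms i) _ j (pv_stepJ_self atms i j) _ m hj

-- membership : A's result is the initial value or some pair value
theorem pvA_mem (atms : List Int) (m0 : Int) :
    (PySem.List.pyRange 0 (atms.length : Int) 1).foldl (fun m i =>
        (PySem.List.pyRange 0 (atms.length : Int) 1).foldl (fun m j =>
          let c := PySem.List.pyGetD atms i 0 + PySem.List.pyGetD atms j 0 + |i - j|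
          if c > m then c else m) m) m0 = m0 ∨
      ∃ i j : Int, 0 ≤ i ∧ i < (atms.length : Int) ∧ 0 ≤ j ∧ j < (atms.length : Int) ∧
        (PySem.List.pyRange 0 (atms.length : Int) 1).foldl (fun m i =>
          (PySem.List.pyRange 0 (atms.length : Int) 1).foldl (fun m j =>
            let c := PySem.List.pyGetD atms i 0 + PySem.List.pyGetD atms j 0 + |i - j|
            if c > m then c else m) m) m0 = pvCalc atms i j := by
  have := pv_foldl_shape (fun m i =>
      (PySem.List.pyRange 0 (atms.length : Int) 1).foldl (fun m j =>
        let c := PySem.List.pyGetD atms i 0 + PySem.List.pyGetD atms j 0 + |i - j|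
        if c > m then c else m) m)
    (fun r => ∃ i j : Int, 0 ≤ i ∧ i < (atms.length : Int) ∧ 0 ≤ j ∧ j < (atms.length : Int) ∧ r = pvCalc atms i j)
    (PySem.List.pyRange 0 (atms.length : Int) 1) m0 ?_
  · rcases this with h | ⟨i, j, h⟩
    · left; exact h
    · right; exact ⟨i, j, h.1, h.2.1, h.2.2.1, h.2.2.2.1, h.2.2.2.2⟩
  · intro m y hy
    have hy' := (PySem.List.mem_pyRange_one).mp hy
    have := pv_foldl_shape (fun m j =>
        let c := PySem.List.pyGetD atms y 0 + PySem.List.pyGetD atms j 0 + |y - j|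
        if c > m then c else m)
      (fun r => ∃ i j : Int, 0 ≤ i ∧ i < (atms.length : Int) ∧ 0 ≤ j ∧ j < (atms.length : Int) ∧ r = pvCalc atms i j)
      (PySem.List.pyRange 0 (atms.length : Int) 1) m ?_
    · exact this
    · intro m' z hz
      have hz' := (PySem.List.mem_pyRange_one).mp hz
      dsimp only
      split
      · right; exact ⟨y, z, hy'.1, hy'.2, hz'.1, hz'.2, rfl⟩
      · left; rfl

-- B's loop invariant
def pvInv (atms : List Int) (t : Int) (s : Int × Int) : Prop :=
  ((∃ k, 0 ≤ k ∧ k ≤ t ∧ s.1 = pvG atms k - k) ∧ (∀ k, 0 ≤ k → k ≤ t → pvG atms k - k ≤ s.1)) ∧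
  ((∃ i j, 0 ≤ i ∧ i ≤ j ∧ j ≤ t ∧ s.2 = pvG atms i + pvG atms j + (j - i)) ∧
   (∀ i j, 0 ≤ i → i ≤ j → j ≤ t → pvG atms i + pvG atms j + (j - i) ≤ s.2))

def pvStepB (atms : List Int) (s : Int × Int) (j : Int) : Int × Int :=
  let v := PySem.List.pyGetD atms j 0
  let best := if v - j > s.1 then v - j else s.1
  let cur := v + j + best
  (best, if cur > s.2 then cur else s.2)

theorem pvB_step (atms : List Int) (t : Int) (ht : 0 ≤ t) (s : Int × Int)
    (h : pvInv atms t s) : pvInv atms (t + 1) (pvStepB atms s (t + 1)) := by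
  obtain ⟨⟨⟨k0, hk0⟩, hbub⟩, ⟨⟨i0, j0, hij0⟩, haub⟩⟩ := h
  unfold pvStepB pvInv
  dsimp only
  set v := PySem.List.pyGetD atms (t + 1) 0 with hv
  have hgv : pvG atms (t + 1) = v := rfl
  constructor
  · constructor
    · split
      · exact ⟨t + 1, by omega, by omega, by rw [hgv]⟩
      · exact ⟨k0, hk0.1, by omega, hk0.2.2⟩
    · intro k hk1 hk2
      rcases lt_or_ge k (t + 1) with h' | h'
      · have := hbub k hk1 (by omega); split <;> omega
      · have : k = t + 1 := by omega
        subst this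
        rw [hgv]; split <;> omega
  · constructor
    · have hbest : ∃ k, 0 ≤ k ∧ k ≤ t + 1 ∧
          (if v - (t + 1) > s.1 then v - (t + 1) else s.1) = pvG atms k - k := by
        split
        · exact ⟨t + 1, by omega, le_refl _, by rw [hgv]⟩
        · exact ⟨k0, hk0.1, by omega, hk0.2.2⟩
      obtain ⟨k, hk1, hk2, hkeq⟩ := hbest
      rw [hkeq]
      split
      · exact ⟨k, t + 1, hk1, hk2, le_refl _, by rw [hgv]; ring⟩
      · exact ⟨i0, j0, hij0.1, hij0.2.1, by omega, hij0.2.2.2⟩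
    · intro i j hi hij hj
      rcases lt_or_ge j (t + 1) with h' | h'
      · have := haub i j hi hij (by omega); split <;> omega
      · have : j = t + 1 := by omega
        subst this
        have hbi : pvG atms i - i ≤ (if v - (t+1) > s.1 then v - (t+1) else s.1) := by
          rcases lt_or_ge i (t + 1) with h'' | h''
          · have := hbub i hi (by omega); split <;> omega
          · have : i = t + 1 := by omega
            subst this
            rw [hgv]; split <;> omega
        have hgv' : pvG atms i + pvG atms (t+1) + ((t+1) - i)
            = v + (t + 1) + (pvG atms i - i) := by rw [hgv]; ring
        rw [hgv']
        split <;> omega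

theorem pvB_fold (atms : List Int) (s0 : Int × Int) (h0 : pvInv atms 0 s0) :
    ∀ t : Int, 0 ≤ t →
      pvInv atms t ((PySem.List.pyRange 1 (t + 1) 1).foldl (pvStepB atms) s0) := by
  intro t ht
  induction t, ht using Int.le_induction with
  | base => rw [PySem.List.pyRange_one_eq_nil (by omega)]; exact h0
  | succ t ht ih =>
    rw [PySem.List.pyRange_one_succ_right (by omega), List.foldl_append]
    simp only [List.foldl_cons, List.foldl_nil]
    exact pvB_step atms t ht _ ih

-- the maximum element of a nonempty list is attained at some index
theorem pv_max_attained (atms : List Int) (hne : atms ≠ []) :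
    ∃ m : Int, PySem.List.max? atms (fun x => x) = some m ∧
      (∃ k : Int, 0 ≤ k ∧ k < (atms.length : Int) ∧ pvG atms k = m) ∧
      (∀ y ∈ atms, y ≤ m) := by
  cases hm : PySem.List.max? atms (fun x => x) with
  | none => exact absurd ((PySem.List.max?_eq_none_iff atms _).mp hm) hne
  | some m =>
  have hmem : m ∈ atms := PySem.List.max?_mem hm
  rcases List.mem_iff_getElem.mp hmem with ⟨k, hk, hget⟩
  refine ⟨m, rfl, ⟨(k : Int), by omega, by exact_mod_cast hk, ?_⟩, PySem.List.max?_isMax hm⟩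
  simp [pvG, PySem.List.pyGetD_natCast, List.getD_eq_getElem?_getD, hk, hget]

-- pair values are bounded by B's result
theorem pvB_ub (atms : List Int) (hne : atms ≠ []) (i j : Int)
    (hi : 0 ≤ i) (hij : i ≤ j) (hj : j < (atms.length : Int)) :
    pvG atms i + pvG atms j + (j - i) ≤ maximumThrill_alt atms := by
  have hlen : 1 ≤ (atms.length : Int) := by
    have := List.length_pos_iff.mpr hne; omega
  have h0 : pvInv atms 0 (pvG atms 0, 2 * pvG atms 0) := by
    refine ⟨⟨⟨0, le_refl _, le_refl _, by ring⟩, ?_⟩, ⟨⟨0, 0, le_refl _, le_refl _, le_refl _, by ring⟩, ?_⟩⟩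
    · intro k h1 h2; have : k = 0 := by omega
      subst this; simp
    · intro i j h1 h2 h3
      have : i = 0 := by omega
      have hj0 : j = 0 := by omega
      subst this; subst hj0; omega
  have := pvB_fold atms _ h0 ((atms.length : Int) - 1) (by omega)
  have hrw : (atms.length : Int) - 1 + 1 = (atms.length : Int) := by ring
  rw [hrw] at this
  have hub := this.2.2 i j hi hij (by omega)
  unfold maximumThrill_alt
  dsimp only
  exact le_trans hub (le_of_eq rfl)

-- B's result is some pair value
theorem pvB_mem (atms : List Int) (hne : atms ≠ []) :
    ∃ i j : Int, 0 ≤ i ∧ i ≤ j ∧ j < (atms.length : Int) ∧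
      maximumThrill_alt atms = pvG atms i + pvG atms j + (j - i) := by
  have hlen : 1 ≤ (atms.length : Int) := by
    have := List.length_pos_iff.mpr hne; omega
  have h0 : pvInv atms 0 (pvG atms 0, 2 * pvG atms 0) := by
    refine ⟨⟨⟨0, le_refl _, le_refl _, by ring⟩, ?_⟩, ⟨⟨0, 0, le_refl _, le_refl _, le_refl _, by ring⟩, ?_⟩⟩
    · intro k h1 h2; have : k = 0 := by omega
      subst this; simp
    · intro i j h1 h2 h3
      have : i = 0 := by omega
      have hj0 : j = 0 := by omega
      subst this; subst hj0; omega
  have := pvB_fold atms _ h0 ((atms.length : Int) - 1) (by omega)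
  have hrw : (atms.length : Int) - 1 + 1 = (atms.length : Int) := by ring
  rw [hrw] at this
  obtain ⟨i, j, h1, h2, h3, h4⟩ := this.2.1
  exact ⟨i, j, h1, h2, by omega, by unfold maximumThrill_alt; dsimp only; exact h4⟩

-- ===== VERDICT (by name: the statement is the Claim_ definition above) =====
theorem maximumThrill_spec : Claim_equal_maximumThrill := by
  intro atms _ hpre
  unfold Spec_maximumThrill
  have hne : atms ≠ [] := hpre
  obtain ⟨m, hm, ⟨k, hk0, hk1, hgk⟩, hmax⟩ := pv_max_attained atms hne
  apply le_antisymm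
  · -- A ≤ B
    unfold maximumThrill
    dsimp only
    rw [hm]
    rcases pvA_mem atms ((some m).getD 0 * 2) with h | ⟨i, j, hi0, hi1, hj0, hj1, h⟩
    · rw [h]
      have : (some m).getD 0 * 2 = pvG atms k + pvG atms k + (k - k) := by
        simp [hgk]; ring
      rw [this]
      exact pvB_ub atms hne k k hk0 (le_refl _) hk1
    · rw [h]
      rcases le_or_gt i j with hij | hij
      · have : pvCalc atms i j = pvG atms i + pvG atms j + (j - i) := by
          unfold pvCalc
          rw [abs_of_nonpos (by omega)]; ring
        rw [this]
        exact pvB_ub atms hne i j hi0 hij hj1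
      · have : pvCalc atms i j = pvG atms j + pvG atms i + (i - j) := by
          unfold pvCalc
          rw [abs_of_nonneg (by omega)]; ring
        rw [this]
        exact pvB_ub atms hne j i hj0 (by omega) hi1
  · -- B ≤ A
    obtain ⟨i, j, hi0, hij, hj1, hB⟩ := pvB_mem atms hne
    rw [hB]
    unfold maximumThrill
    dsimp only
    have : pvG atms i + pvG atms j + (j - i) = pvCalc atms i j := by
      unfold pvCalc
      rw [abs_of_nonpos (by omega)]; ring
    rw [this]
    exact pvA_ub atms i j
      (PySem.List.mem_pyRange_one.mpr ⟨hi0, by omega⟩)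
      (PySem.List.mem_pyRange_one.mpr ⟨by omega, hj1⟩) _
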